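-- pv_equiv track=rewrite | github.com/k1ly/Labs_Crypto | Lab12/support_function.py | GetFirstMutuallyPrimeNumber
-- ===== SOURCE A (Python) =====
-- def GetFirstMutuallyPrimeNumber(number: int) -> int:
--     def gcd(a, b):
--         while b != 0:
--             a, b = b, a % b
--         return a
--
--     for i in range(2, int(number ** 0.5) + 1):
--         if gcd(number, i) == 1:
--             return i
--
--     return None
-- ===== SOURCE B (Python) =====
-- def GetFirstMutuallyPrimeNumber(number: int) -> int:
--     # The smallest integer coprime to `number` is the smallest prime that does
--     # not divide `number`: scan candidates, keep only primes (trial division),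
--     # and test plain divisibility instead of running Euclid's gcd.
--     limit = int(number ** 0.5)
--     for p in range(2, limit + 1):
--         if all(p % q for q in range(2, p)) and number % p != 0:
--             return p
--     return None
-- ===== Notes on version B (the rewrite author's own statement) =====
-- stated objective: alternative
-- what changed: B replaces per-candidate Euclid gcd tests with a primality filter plus a single divisibility test, using the fact that the smallest integer coprime to n is the smallest prime not dividing n.
import Mathlib
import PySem

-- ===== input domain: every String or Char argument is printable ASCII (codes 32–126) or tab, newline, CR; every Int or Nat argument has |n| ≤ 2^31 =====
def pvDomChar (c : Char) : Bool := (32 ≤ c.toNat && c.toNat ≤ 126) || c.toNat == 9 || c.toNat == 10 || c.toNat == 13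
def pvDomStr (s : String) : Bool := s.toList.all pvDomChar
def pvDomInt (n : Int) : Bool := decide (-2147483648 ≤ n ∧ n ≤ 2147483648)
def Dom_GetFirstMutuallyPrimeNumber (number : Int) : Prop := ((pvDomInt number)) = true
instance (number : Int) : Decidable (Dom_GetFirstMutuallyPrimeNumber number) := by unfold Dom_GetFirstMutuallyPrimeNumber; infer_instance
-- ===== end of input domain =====

-- B replaces A's per-candidate Euclid-gcd test by a primality filter plus one divisibility
-- test (the smallest integer coprime to n is the smallest prime not dividing n); same results,
-- different algorithm (objective: alternative).

-- Shared primitive: port of Python's `int(number ** 0.5)`, which both A and B compute.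
-- Exact integer square root for 0 ≤ number ≤ 2^31 (double sqrt is exact there; negatives
-- make Python raise TypeError and are excluded by Pre_). Fuel-based digit recursion so the
-- kernel can evaluate it; 40 ≥ log₄(2^31) steps suffice on the domain.
def pvIsqrtFuel : Nat → Nat → Nat
  | 0, _ => 0
  | f+1, n =>
      if n = 0 then 0 else
        let r := 2 * pvIsqrtFuel f (n / 4)
        if (r+1)*(r+1) ≤ n then r+1 else r

def pvIntSqrt (n : Int) : Int := (pvIsqrtFuel 40 n.toNat : Nat)

-- needed by pvGcd's termination proof (Python's `%` has |a % b| < |b| for b ≠ 0)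
theorem pvMod_natAbs_lt (a b : Int) (hb : ¬ b = 0) :
    (PySem.Int.mod a b).natAbs < b.natAbs := by
  rcases lt_or_gt_of_ne hb with h | h
  · have h2 := PySem.Int.mod_neg_bounds (a := a) h
    omega
  · have h1 := PySem.Int.mod_nonneg (a := a) h
    have h2 := PySem.Int.mod_lt (a := a) h
    omega

-- ===== PORT A =====
-- A's inner `gcd` while-loop, transliterated
def pvGcd (a b : Int) : Int :=
  if h : b ≠ 0 then pvGcd b (PySem.Int.mod a b) else a
termination_by b.natAbs
decreasing_by exact pvMod_natAbs_lt a b h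

def GetFirstMutuallyPrimeNumber (number : Int) : Option Int :=
  (PySem.List.pyRange 2 (pvIntSqrt number + 1) 1).find? (fun i => pvGcd number i == 1)

-- ===== PORT B =====
-- Source B's `all(p % q for q in range(2, p))`
def pvIsPrimeTrial (p : Int) : Bool :=
  (PySem.List.pyRange 2 p 1).all (fun q => PySem.Int.mod p q != 0)

def GetFirstMutuallyPrimeNumber_alt (number : Int) : Option Int :=
  (PySem.List.pyRange 2 (pvIntSqrt number + 1) 1).find?
    (fun p => pvIsPrimeTrial p && PySem.Int.mod number p != 0)

-- ===== PRECONDITION & SPEC =====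
-- A raises TypeError on negative input (number ** 0.5 is complex there); Pre_ excludes exactly those.
def Pre_GetFirstMutuallyPrimeNumber (number : Int) : Prop := 0 ≤ number
instance (number : Int) : Decidable (Pre_GetFirstMutuallyPrimeNumber number) := by
  unfold Pre_GetFirstMutuallyPrimeNumber; infer_instance

def pvWitness_GetFirstMutuallyPrimeNumber : Int := 7

def Spec_GetFirstMutuallyPrimeNumber (number : Int) (out : Option Int) : Prop := out = GetFirstMutuallyPrimeNumber_alt number
instance (number : Int) (out : Option Int) : Decidable (Spec_GetFirstMutuallyPrimeNumber number out) := by unfold Spec_GetFirstMutuallyPrimeNumber; infer_instance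

-- ===== CLAIM (what is proved, stated in full; the proofs are below) =====
def Claim_equal_GetFirstMutuallyPrimeNumber : Prop := ∀ (number : Int), Dom_GetFirstMutuallyPrimeNumber number → Pre_GetFirstMutuallyPrimeNumber number → Spec_GetFirstMutuallyPrimeNumber number (GetFirstMutuallyPrimeNumber number)

-- ===== LEMMAS AND PROOFS =====

-- A's hand-rolled Euclid loop computes Nat.gcd on nonnegative inputs.
theorem pvGcd_natCast (m n : Nat) : pvGcd (m : Int) (n : Int) = ((Nat.gcd m n : Nat) : Int) := by
  induction n using Nat.strong_induction_on generalizing m with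
  | _ n ih =>
    rw [pvGcd]
    by_cases h0 : n = 0
    · subst h0; simp
    · have hne : ((n : Int) ≠ 0) := by exact_mod_cast h0
      rw [dif_pos hne, PySem.Int.mod_natCast m n,
        ih (m % n) (Nat.mod_lt m (Nat.pos_of_ne_zero h0)) n]
      congr 1
      calc Nat.gcd n (m % n) = Nat.gcd (m % n) n := Nat.gcd_comm _ _
        _ = Nat.gcd n m := (Nat.gcd_rec n m).symm
        _ = Nat.gcd m n := Nat.gcd_comm _ _

-- B's trial division decides primality of p ≥ 2.
theorem pvIsPrimeTrial_iff (p : Int) (hp : 2 ≤ p) :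
    pvIsPrimeTrial p = true ↔ Nat.Prime p.toNat := by
  obtain ⟨P, rfl⟩ := Int.eq_ofNat_of_zero_le (by omega : (0:Int) ≤ p)
  have hP2 : 2 ≤ P := by exact_mod_cast hp
  rw [Int.toNat_natCast]
  unfold pvIsPrimeTrial
  rw [List.all_eq_true]
  constructor
  · intro h
    rw [Nat.prime_def_lt]
    refine ⟨hP2, fun m hm hdvd => ?_⟩
    by_contra hm1
    have hm2 : 2 ≤ m := by
      rcases Nat.eq_zero_or_pos m with rfl | hpos
      · exact absurd (Nat.eq_zero_of_zero_dvd hdvd) (by omega)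
      · omega
    have hmem : (m : Int) ∈ PySem.List.pyRange 2 (P : Int) 1 := by
      rw [PySem.List.mem_pyRange_one]
      constructor <;> [exact_mod_cast hm2; exact_mod_cast hm]
    have := h _ hmem
    simp only [bne_iff_ne, ne_eq] at this
    exact this ((PySem.Int.mod_eq_zero_iff_dvd _ _).mpr (Int.natCast_dvd_natCast.mpr hdvd))
  · intro hprime q hq
    rw [PySem.List.mem_pyRange_one] at hq
    obtain ⟨Q, rfl⟩ := Int.eq_ofNat_of_zero_le (by omega : (0:Int) ≤ q)
    simp only [bne_iff_ne, ne_eq]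
    intro hmod
    have hdvd : Q ∣ P :=
      Int.natCast_dvd_natCast.mp ((PySem.Int.mod_eq_zero_iff_dvd _ _).mp hmod)
    have hQ2 : 2 ≤ Q := by exact_mod_cast hq.1
    have hQP : Q < P := by exact_mod_cast hq.2
    have := (Nat.prime_def_lt.mp hprime).2 Q hQP hdvd
    omega

-- If i is the FIRST candidate ≥ 2 with gcd(n,i) = 1 then i is prime and i ∤ n.
theorem pvFirst_coprime_is_prime (n i : Int) (hn : 0 ≤ n) (hi : 2 ≤ i)
    (h1 : (pvGcd n i == 1) = true)
    (hmin : ∀ j : Int, 2 ≤ j → j < i → (pvGcd n j == 1) = false) :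
    (pvIsPrimeTrial i && PySem.Int.mod n i != 0) = true := by
  obtain ⟨N, rfl⟩ := Int.eq_ofNat_of_zero_le hn
  obtain ⟨I, rfl⟩ := Int.eq_ofNat_of_zero_le (by omega : (0:Int) ≤ i)
  have hI2 : 2 ≤ I := by exact_mod_cast hi
  rw [pvGcd_natCast, beq_iff_eq] at h1
  have hgcd : Nat.gcd N I = 1 := by exact_mod_cast h1
  rw [Bool.and_eq_true]
  constructor
  · rw [pvIsPrimeTrial_iff _ hi, Int.toNat_natCast]
    have hne1 : I ≠ 1 := by omega
    have hmp : (I.minFac).Prime := Nat.minFac_prime hne1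
    have hmd : I.minFac ∣ I := Nat.minFac_dvd I
    have hmle : I.minFac ≤ I := Nat.le_of_dvd (by omega) hmd
    by_cases hlt : I.minFac < I
    · exfalso
      have hcop : Nat.gcd N I.minFac = 1 :=
        Nat.Coprime.coprime_dvd_right hmd hgcd
      have hj := hmin (I.minFac : Int) (by exact_mod_cast hmp.two_le)
        (by exact_mod_cast hlt)
      rw [pvGcd_natCast, hcop] at hj
      simp at hj
    · have : I.minFac = I := le_antisymm hmle (not_lt.mp hlt)
      exact this ▸ hmp
  · simp only [bne_iff_ne, ne_eq]
    intro hmod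
    have hdvd : I ∣ N :=
      Int.natCast_dvd_natCast.mp ((PySem.Int.mod_eq_zero_iff_dvd _ _).mp hmod)
    have : I ∣ Nat.gcd N I := Nat.dvd_gcd hdvd dvd_rfl
    rw [hgcd] at this
    have := Nat.dvd_one.mp this
    omega

-- A prime not dividing n is coprime to n.
theorem pvPrime_not_dvd_coprime (n i : Int) (hn : 0 ≤ n) (hi : 2 ≤ i)
    (h : (pvIsPrimeTrial i && PySem.Int.mod n i != 0) = true) :
    (pvGcd n i == 1) = true := by
  obtain ⟨N, rfl⟩ := Int.eq_ofNat_of_zero_le hn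
  obtain ⟨I, rfl⟩ := Int.eq_ofNat_of_zero_le (by omega : (0:Int) ≤ i)
  rw [Bool.and_eq_true] at h
  have hprime : I.Prime := by
    have := (pvIsPrimeTrial_iff _ hi).mp h.1
    rwa [Int.toNat_natCast] at this
  have hndvd : ¬ I ∣ N := by
    intro hdvd
    have : PySem.Int.mod (N : Int) (I : Int) = 0 :=
      (PySem.Int.mod_eq_zero_iff_dvd _ _).mpr (Int.natCast_dvd_natCast.mpr hdvd)
    simp [this] at h
  have hcop : Nat.gcd N I = 1 :=
    Nat.Coprime.symm ((Nat.Prime.coprime_iff_not_dvd hprime).mpr hndvd)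
  rw [pvGcd_natCast, beq_iff_eq]
  exact_mod_cast hcop

-- find? over a run of consecutive integers: if q implies p and the first p-element
-- satisfies q, both predicates select the same element.
theorem pvFind_congr_aux (p q : Int → Bool) (b : Int)
    (hqp : ∀ i : Int, 2 ≤ i → q i = true → p i = true)
    (hfirst : ∀ i : Int, 2 ≤ i → p i = true → (∀ j : Int, 2 ≤ j → j < i → p j = false) → q i = true) :
    ∀ (k : Nat) (a : Int), 2 ≤ a → (b - a).toNat = k →
      (∀ j : Int, 2 ≤ j → j < a → p j = false) →
      (PySem.List.pyRange a b 1).find? p = (PySem.List.pyRange a b 1).find? q := by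
  intro k
  induction k with
  | zero =>
    intro a _ hk _
    have hempty : PySem.List.pyRange a b 1 = [] :=
      List.eq_nil_iff_forall_not_mem.mpr fun x hx => by
        rw [PySem.List.mem_pyRange_one] at hx; omega
    rw [hempty]
    rfl
  | succ k ih =>
    intro a ha hk hinv
    have hab : a < b := by omega
    rw [PySem.List.pyRange_one_cons hab]
    by_cases hpa : p a = true
    · rw [List.find?_cons_of_pos hpa, List.find?_cons_of_pos (hfirst a ha hpa hinv)]
    · have hpa' : p a = false := by
        cases h : p a
        · rfl
        · exact absurd h hpa
      have hqa : q a = false := by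
        cases h : q a
        · rfl
        · exact absurd (hqp a ha h) hpa
      rw [List.find?_cons_of_neg (by simp [hpa']), List.find?_cons_of_neg (by simp [hqa])]
      exact ih (a + 1) (by omega) (by omega)
        (fun j h2 hj => by
          rcases lt_or_eq_of_le (by omega : j ≤ a) with h' | h'
          · exact hinv j h2 h'
          · exact h' ▸ hpa')

theorem pvFind_congr (p q : Int → Bool) (b : Int)
    (hqp : ∀ i : Int, 2 ≤ i → q i = true → p i = true)
    (hfirst : ∀ i : Int, 2 ≤ i → p i = true → (∀ j : Int, 2 ≤ j → j < i → p j = false) → q i = true) :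
    (PySem.List.pyRange 2 b 1).find? p = (PySem.List.pyRange 2 b 1).find? q :=
  pvFind_congr_aux p q b hqp hfirst (b - 2).toNat 2 le_rfl rfl (fun _ h2 hj => absurd h2 (by omega))

-- ===== VERDICT (by name: the statement is the Claim_ definition above) =====
theorem GetFirstMutuallyPrimeNumber_spec : Claim_equal_GetFirstMutuallyPrimeNumber := by
  intro number _ hpre
  unfold Spec_GetFirstMutuallyPrimeNumber GetFirstMutuallyPrimeNumber GetFirstMutuallyPrimeNumber_alt
  exact pvFind_congr _ _ _
    (fun i hi hq => pvPrime_not_dvd_coprime number i hpre hi hq)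
    (fun i hi hp hmin => pvFirst_coprime_is_prime number i hpre hi hp hmin)
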